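-- pv_equiv track=rewrite | github.com/ai-meharbnsingh/astro_rattan | app/dasha_engine.py | _is_in_papakartari
-- ===== SOURCE A (Python) =====
-- _MALEFICS = {"Sun", "Mars", "Saturn", "Rahu", "Ketu"}
--
-- def _is_in_papakartari(planet: str, planet_house: int, planets: dict) -> bool:
--     """
--     Planet is in Papakartari when malefics occupy BOTH adjacent houses.
--     house_before = (house - 2) % 12 + 1, house_after = house % 12 + 1.
--     """
--     if not (1 <= planet_house <= 12):
--         return False
--     house_before = ((planet_house - 2) % 12) + 1
--     house_after = (planet_house % 12) + 1
--
--     mal_before = any(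
--         m != planet
--         and isinstance(planets.get(m), dict)
--         and int((planets[m] or {}).get("house", 0) or 0) == house_before
--         for m in _MALEFICS
--     )
--     mal_after = any(
--         m != planet
--         and isinstance(planets.get(m), dict)
--         and int((planets[m] or {}).get("house", 0) or 0) == house_after
--         for m in _MALEFICS
--     )
--     return mal_before and mal_after
-- ===== SOURCE B (Python) =====
-- _MALEFICS = {"Sun", "Mars", "Saturn", "Rahu", "Ketu"}
--
-- def _is_in_papakartari(planet: str, planet_house: int, planets: dict) -> bool:
--     # B: one pass over the chart's entries (not over the malefic set), keeping two flags.
--     if not (1 <= planet_house <= 12):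
--         return False
--     house_before = ((planet_house - 2) % 12) + 1
--     house_after = (planet_house % 12) + 1
--     mal_before = False
--     mal_after = False
--     for name, data in planets.items():
--         if name == planet or name not in _MALEFICS or not isinstance(data, dict):
--             continue
--         h = int((data or {}).get("house", 0) or 0)
--         mal_before = mal_before or h == house_before
--         mal_after = mal_after or h == house_after
--     return mal_before and mal_after
-- ===== Notes on version B (the rewrite author's own statement) =====
-- stated objective: alternative
-- what changed: B inverts the traversal: instead of A's two any()-scans over the fixed _MALEFICS set (each doing a dict lookup per malefic), B makes a single pass over planets.items(), filtering entries by malefic membership and updating two boolean flags; Pre_ only requires the assoc-list model of the dict to have distinct keys, which every real Python dict has.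
import Mathlib
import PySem

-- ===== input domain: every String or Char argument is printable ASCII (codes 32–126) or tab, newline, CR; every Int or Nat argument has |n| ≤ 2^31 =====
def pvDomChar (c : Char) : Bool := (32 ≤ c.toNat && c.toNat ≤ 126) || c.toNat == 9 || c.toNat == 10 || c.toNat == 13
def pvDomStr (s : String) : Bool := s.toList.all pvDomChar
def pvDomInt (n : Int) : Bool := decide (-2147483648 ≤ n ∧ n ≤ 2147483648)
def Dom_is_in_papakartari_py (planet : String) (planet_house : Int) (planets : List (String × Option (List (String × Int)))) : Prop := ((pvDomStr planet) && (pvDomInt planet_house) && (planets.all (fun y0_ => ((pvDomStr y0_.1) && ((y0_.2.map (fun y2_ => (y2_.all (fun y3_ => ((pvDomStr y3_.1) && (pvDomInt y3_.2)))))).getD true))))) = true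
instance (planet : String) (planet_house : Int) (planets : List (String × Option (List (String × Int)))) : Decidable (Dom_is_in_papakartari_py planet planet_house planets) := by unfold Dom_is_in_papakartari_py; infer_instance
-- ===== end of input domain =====

-- B inverts the traversal: a single pass over the planets dict's entries with two boolean
-- flags, instead of A's two any()-scans over the fixed malefic set (objective: alternative).

-- ===== PORT A =====
-- _MALEFICS (a set of 5 literals; any() over it is order-independent, so a fixed list is exact)
def pvMalefics : List String := ["Sun", "Mars", "Saturn", "Rahu", "Ketu"]

-- first-match lookup on an assoc list = Python dict lookup (hand port, exact: the type
-- convention represents a dict as its items in insertion order, lookup = first match)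
def pvLookup {ν : Type} (d : List (String × ν)) (k : String) : Option ν :=
  (d.find? (fun kv => kv.1 == k)).map (fun kv => kv.2)

-- int((d or {}).get("house", 0) or 0): empty dict is falsy ('or {}'), 'or 0' maps 0 to 0,
-- int() is the identity on ints — exact on the Int-valued house dicts of this type.
def pvHouseVal (d : List (String × Int)) : Int :=
  let v := (pvLookup (if d.isEmpty then [] else d) "house").getD 0
  if v == 0 then 0 else v

-- one conjunct of A's any(): m != planet and isinstance(planets.get(m), dict) and int(...) == h
-- (isinstance is true exactly when the key maps to a dict, i.e. lookup returns some (some d))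
def pvMalPred (planet : String) (planets : List (String × Option (List (String × Int)))) (m : String) (h : Int) : Bool :=
  (m != planet) &&
    (match pvLookup planets m with
     | some (some d) => pvHouseVal d == h
     | _ => false)

def is_in_papakartari_py (planet : String) (planet_house : Int) (planets : List (String × Option (List (String × Int)))) : Bool :=
  if ¬ (1 ≤ planet_house ∧ planet_house ≤ 12) then false
  else
    let house_before := PySem.Int.mod (planet_house - 2) 12 + 1
    let house_after := PySem.Int.mod planet_house 12 + 1
    let mal_before := pvMalefics.any (fun m => pvMalPred planet planets m house_before)
    let mal_after := pvMalefics.any (fun m => pvMalPred planet planets m house_after)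
    mal_before && mal_after

-- ===== PORT B =====
-- Source B's loop body: one step over an items() entry, updating the (mal_before, mal_after) flags
def pvStep (planet : String) (hb ha : Int) (fl : Bool × Bool) (kv : String × Option (List (String × Int))) : Bool × Bool :=
  if kv.1 == planet || !(pvMalefics.contains kv.1) then fl
  else
    match kv.2 with
    | some d => (fl.1 || (pvHouseVal d == hb), fl.2 || (pvHouseVal d == ha))
    | none => fl

def is_in_papakartari_py_alt (planet : String) (planet_house : Int) (planets : List (String × Option (List (String × Int)))) : Bool :=
  if ¬ (1 ≤ planet_house ∧ planet_house ≤ 12) then false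
  else
    let house_before := PySem.Int.mod (planet_house - 2) 12 + 1
    let house_after := PySem.Int.mod planet_house 12 + 1
    let flags := planets.foldl (pvStep planet house_before house_after) (false, false)
    flags.1 && flags.2

-- ===== PRECONDITION & SPEC =====
-- Pre_ requires the association list modelling `planets` to have pairwise-distinct keys — a
-- property every real Python dict has by construction, so no input A returns on is excluded;
-- it only rules out assoc lists that do not represent a dict (where A's first-match lookup
-- and B's full traversal could legitimately disagree).
def Pre_is_in_papakartari_py (planet : String) (planet_house : Int) (planets : List (String × Option (List (String × Int)))) : Prop :=
  (planets.map Prod.fst).Nodup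
instance (planet : String) (planet_house : Int) (planets : List (String × Option (List (String × Int)))) : Decidable (Pre_is_in_papakartari_py planet planet_house planets) := by unfold Pre_is_in_papakartari_py; infer_instance

def pvWitness_is_in_papakartari_py : String × Int × (List (String × Option (List (String × Int)))) :=
  ("Moon", 5, [("Mars", some [("house", 4)]), ("Saturn", some [("house", 6)])])

def Spec_is_in_papakartari_py (planet : String) (planet_house : Int) (planets : List (String × Option (List (String × Int)))) (out : Bool) : Prop := out = is_in_papakartari_py_alt planet planet_house planets
instance (planet : String) (planet_house : Int) (planets : List (String × Option (List (String × Int)))) (out : Bool) : Decidable (Spec_is_in_papakartari_py planet planet_house planets out) := by unfold Spec_is_in_papakartari_py; infer_instance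

-- ===== CLAIM (what is proved, stated in full; the proofs are below) =====
def Claim_equal_is_in_papakartari_py : Prop := ∀ (planet : String) (planet_house : Int) (planets : List (String × Option (List (String × Int)))), Dom_is_in_papakartari_py planet planet_house planets → Pre_is_in_papakartari_py planet planet_house planets → Spec_is_in_papakartari_py planet planet_house planets (is_in_papakartari_py planet planet_house planets)

-- ===== LEMMAS AND PROOFS =====

-- B's single entry test for house h, as a predicate over one items() entry
def pvEntryPred (planet : String) (h : Int) (kv : String × Option (List (String × Int))) : Bool :=
  !(kv.1 == planet || !(pvMalefics.contains kv.1)) &&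
    (match kv.2 with
     | some d => pvHouseVal d == h
     | none => false)

-- the folded flags are the initial flags or'ed with 'some entry matches'
theorem pv_foldl_flags (planet : String) (hb ha : Int)
    (l : List (String × Option (List (String × Int)))) (fl : Bool × Bool) :
    l.foldl (pvStep planet hb ha) fl
      = (fl.1 || l.any (pvEntryPred planet hb), fl.2 || l.any (pvEntryPred planet ha)) := by
  induction l generalizing fl with
  | nil => simp
  | cons kv t ih =>
    rw [List.foldl_cons, ih]
    simp only [List.any_cons, pvStep, pvEntryPred]
    by_cases h1 : kv.1 = planet
    · simp [h1]
    · by_cases h2 : kv.1 ∈ pvMalefics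
      · have hbq : (kv.1 == planet) = false := by simp [h1]
        cases hd : kv.2 with
        | none => simp [h1, h2]
        | some d => simp [h2, hbq, Bool.or_assoc]
      · simp [h2]

-- with distinct keys, membership in the assoc list is exactly a successful lookup
theorem pv_lookup_mem {ν : Type} (l : List (String × ν)) (k : String) (v : ν)
    (hnd : (l.map Prod.fst).Nodup) :
    pvLookup l k = some v ↔ (k, v) ∈ l := by
  induction l with
  | nil => simp [pvLookup]
  | cons kv t ih =>
    simp only [List.map_cons, List.nodup_cons] at hnd
    by_cases he : kv.1 = k
    · simp only [pvLookup, List.find?_cons, he, beq_self_eq_true, Option.map_some,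
        List.mem_cons]
      constructor
      · rintro h; left; cases kv; simp_all
      · rintro (h | h)
        · cases kv; simp_all
        · exact absurd (by simpa [← he] using List.mem_map_of_mem (f := Prod.fst) h) hnd.1
    · have hb : (kv.1 == k) = false := by simp [he]
      simp only [pvLookup, List.find?_cons, hb, List.mem_cons]
      rw [show ((t.find? (fun kv => kv.1 == k)).map (fun kv => kv.2) = some v) ↔ pvLookup t k = some v from Iff.rfl]
      rw [ih hnd.2]
      constructor
      · exact Or.inr
      · rintro (h | h)
        · exact absurd (congrArg Prod.fst h).symm he
        · exact h

-- the crux: under distinct keys, 'some entry of planets matches' = 'some malefic's lookup matches'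
theorem pv_any_flip (planet : String) (planets : List (String × Option (List (String × Int))))
    (h : Int) (hnd : (planets.map Prod.fst).Nodup) :
    planets.any (pvEntryPred planet h) = pvMalefics.any (fun m => pvMalPred planet planets m h) := by
  apply Bool.eq_iff_iff.mpr
  simp only [List.any_eq_true]
  constructor
  · rintro ⟨kv, hmem, hp⟩
    simp only [pvEntryPred, Bool.and_eq_true, Bool.not_eq_true', Bool.or_eq_false_iff,
      Bool.not_eq_false'] at hp
    obtain ⟨⟨hne, hmal⟩, hmatch⟩ := hp
    refine ⟨kv.1, by simpa using hmal, ?_⟩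
    cases hd : kv.2 with
    | none => rw [hd] at hmatch; exact absurd hmatch (by simp)
    | some d =>
      rw [hd] at hmatch
      have hlk : pvLookup planets kv.1 = some (some d) := by
        rw [pv_lookup_mem _ _ _ hnd]; rw [← hd]; exact hmem
      simp [pvMalPred, hlk, hmatch, bne, hne]
  · rintro ⟨m, hmmem, hp⟩
    simp only [pvMalPred, Bool.and_eq_true, bne_iff_ne] at hp
    obtain ⟨hne, hmatch⟩ := hp
    cases hlk : pvLookup planets m with
    | none => rw [hlk] at hmatch; exact absurd hmatch (by simp)
    | some o =>
      rw [hlk] at hmatch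
      cases o with
      | none => exact absurd hmatch (by simp)
      | some d =>
        refine ⟨(m, some d), (pv_lookup_mem _ _ _ hnd).mp hlk, ?_⟩
        simp [pvEntryPred, hne, hmmem, hmatch]

-- ===== VERDICT (by name: the statement is the Claim_ definition above) =====
theorem is_in_papakartari_py_spec : Claim_equal_is_in_papakartari_py := by
  intro planet planet_house planets _ hpre
  unfold Spec_is_in_papakartari_py is_in_papakartari_py is_in_papakartari_py_alt
  by_cases hr : 1 ≤ planet_house ∧ planet_house ≤ 12
  · simp only [hr]
    rw [pv_foldl_flags]
    rw [pv_any_flip _ _ _ hpre, pv_any_flip _ _ _ hpre]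
    simp
  · simp [hr]
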